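-- pv_equiv track=rewrite | github.com/NSEvteev/FullSpec | specs/.instructions/.scripts/analysis-status.py | get_chain_status
-- ===== SOURCE A (Python) =====
-- DOCS = [
--     ("Discussion", "discussion.md"),
--     ("Design", "design.md"),
--     ("Plan Tests", "plan-test.md"),
--     ("Plan Dev", "plan-dev.md"),
--     ("Review", "review.md"),
-- ]
--
-- def get_chain_status(info: dict) -> str:
--     """Определить общий статус цепочки (по наименьшему прогрессу 4 основных)."""
--     priority = ["DRAFT", "WAITING", "RUNNING", "REVIEW", "DONE",
--                 "CONFLICT", "ROLLING_BACK", "REJECTED"]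
--     statuses = [info["docs"].get(label, "—")
--                 for label, _ in DOCS[:4]]  # Только 4 основных
--     for p in priority:
--         if p in statuses:
--             return p
--     return "—"
-- ===== SOURCE B (Python) =====
-- DOCS = [
--     ("Discussion", "discussion.md"),
--     ("Design", "design.md"),
--     ("Plan Tests", "plan-test.md"),
--     ("Plan Dev", "plan-dev.md"),
--     ("Review", "review.md"),
-- ]
--
-- def get_chain_status(info: dict) -> str:
--     priority = ["DRAFT", "WAITING", "RUNNING", "REVIEW", "DONE",
--                 "CONFLICT", "ROLLING_BACK", "REJECTED"]
--     rank = {p: i for i, p in enumerate(priority)}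
--     docs = info["docs"]
--     best = None  # (rank, status) with the smallest rank seen so far
--     for label, _ in DOCS[:4]:
--         s = docs.get(label, "—")
--         r = rank.get(s)
--         if r is not None and (best is None or r < best[0]):
--             best = (r, s)
--     return "—" if best is None else best[1]
-- ===== Notes on version B (the rewrite author's own statement) =====
-- stated objective: idiomatic
-- what changed: A scans the priority list and does a membership test over the collected statuses for each priority; B builds a rank dictionary once and makes a single pass over the four doc labels, keeping the status with the lowest rank.
import Mathlib
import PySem

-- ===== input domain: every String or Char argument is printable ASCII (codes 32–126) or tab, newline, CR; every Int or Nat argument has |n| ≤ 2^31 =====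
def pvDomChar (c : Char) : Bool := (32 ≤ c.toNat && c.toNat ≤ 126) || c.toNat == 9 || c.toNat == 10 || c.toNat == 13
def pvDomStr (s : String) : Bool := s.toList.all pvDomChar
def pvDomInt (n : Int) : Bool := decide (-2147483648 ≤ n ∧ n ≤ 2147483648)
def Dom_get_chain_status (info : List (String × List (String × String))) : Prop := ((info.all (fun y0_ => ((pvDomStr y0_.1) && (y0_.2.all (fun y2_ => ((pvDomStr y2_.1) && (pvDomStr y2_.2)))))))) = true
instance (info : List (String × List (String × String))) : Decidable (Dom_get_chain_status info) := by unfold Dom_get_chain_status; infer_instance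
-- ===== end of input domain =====

-- B replaces A's scan over the priority list (with an inner membership test over the statuses)
-- by a rank dictionary and a single pass over the four doc labels keeping the lowest-ranked status (idiomatic).

-- shared module constants
def pvDOCS : List (String × String) :=
  [("Discussion", "discussion.md"), ("Design", "design.md"), ("Plan Tests", "plan-test.md"),
   ("Plan Dev", "plan-dev.md"), ("Review", "review.md")]
def pvPriority : List String :=
  ["DRAFT", "WAITING", "RUNNING", "REVIEW", "DONE", "CONFLICT", "ROLLING_BACK", "REJECTED"]

-- ===== PORT A =====
def get_chain_status (info : List (String × List (String × String))) : String :=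
  let docs := ((PySem.Dict.mk info).get? "docs").getD []   -- info["docs"]; KeyError excluded by Pre_
  let statuses := (PySem.List.slice pvDOCS none (some 4)).map
      (fun lp => (PySem.Dict.mk docs).getD lp.1 "—")
  match pvPriority.find? (fun p => statuses.contains p) with
  | some p => p
  | none => "—"

-- ===== PORT B =====
-- the loop body of Source B: keep the (rank, status) pair with the smallest rank seen so far
def pvStepB (rank : PySem.Dict String Int) (best : Option (Int × String)) (s : String) :
    Option (Int × String) :=
  match rank.get? s with
  | none => best
  | some r =>
    match best with
    | none => some (r, s)
    | some b => if r < b.1 then some (r, s) else best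

def get_chain_status_alt (info : List (String × List (String × String))) : String :=
  let rank : PySem.Dict String Int :=
    (PySem.List.enumerate pvPriority 0).foldl (fun d ip => d.insert ip.2 ip.1) PySem.Dict.empty
  let docs := ((PySem.Dict.mk info).get? "docs").getD []   -- info["docs"]; KeyError excluded by Pre_
  let best := (PySem.List.slice pvDOCS none (some 4)).foldl
      (fun best lp => pvStepB rank best ((PySem.Dict.mk docs).getD lp.1 "—")) none
  match best with
  | none => "—"
  | some b => b.2

-- ===== PRECONDITION & SPEC =====
-- A (and B) raise KeyError when info has no "docs" key; exactly those inputs are excluded.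
def Pre_get_chain_status (info : List (String × List (String × String))) : Prop :=
  "docs" ∈ info.map Prod.fst
instance (info : List (String × List (String × String))) : Decidable (Pre_get_chain_status info) := by
  unfold Pre_get_chain_status; infer_instance

def pvWitness_get_chain_status : (List (String × List (String × String))) :=
  [("docs", [("Discussion", "DONE"), ("Design", "RUNNING")])]

def Spec_get_chain_status (info : List (String × List (String × String))) (out : String) : Prop := out = get_chain_status_alt info
instance (info : List (String × List (String × String))) (out : String) : Decidable (Spec_get_chain_status info out) := by unfold Spec_get_chain_status; infer_instance

-- ===== CLAIM (what is proved, stated in full; the proofs are below) =====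
def Claim_equal_get_chain_status : Prop := ∀ (info : List (String × List (String × String))), Dom_get_chain_status info → Pre_get_chain_status info → Spec_get_chain_status info (get_chain_status info)

-- ===== LEMMAS AND PROOFS =====

-- the rank dictionary B builds, as a literal
def pvRank : PySem.Dict String Int :=
  PySem.Dict.mk
    [("DRAFT", 0), ("WAITING", 1), ("RUNNING", 2), ("REVIEW", 3), ("DONE", 4),
     ("CONFLICT", 5), ("ROLLING_BACK", 6), ("REJECTED", 7)]

def pvRk (s : String) : Option Int := pvRank.get? s

def pvP (r : Int) : String := pvPriority.getD r.toNat ""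

lemma pvRank_built :
    (PySem.List.enumerate pvPriority 0).foldl
      (fun (d : PySem.Dict String Int) ip => d.insert ip.2 ip.1) PySem.Dict.empty = pvRank := by
  decide

lemma pvRk_some (s : String) (r : Int) (h : pvRk s = some r) :
    s = pvP r ∧ 0 ≤ r ∧ r < 8 := by
  simp only [pvRk, pvRank, PySem.Dict.get?_mk_cons, beq_iff_eq] at h
  split_ifs at h with h1 h2 h3 h4 h5 h6 h7 h8
  · cases h; exact ⟨h1.symm, by decide⟩
  · cases h; exact ⟨h2.symm, by decide⟩
  · cases h; exact ⟨h3.symm, by decide⟩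
  · cases h; exact ⟨h4.symm, by decide⟩
  · cases h; exact ⟨h5.symm, by decide⟩
  · cases h; exact ⟨h6.symm, by decide⟩
  · cases h; exact ⟨h7.symm, by decide⟩
  · cases h; exact ⟨h8.symm, by decide⟩
  · cases h

-- min-fold over the defined ranks
def pvStep2 (o : Option Int) (s : String) : Option Int :=
  match pvRk s with
  | none => o
  | some r =>
    match o with
    | none => some r
    | some b => some (min b r)

lemma pv_decode (st : List String) :
    ∀ o : Option Int,
      st.foldl (pvStepB pvRank) (o.map (fun r => (r, pvP r)))
        = (st.foldl pvStep2 o).map (fun r => (r, pvP r)) := by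
  induction st with
  | nil => intro o; rfl
  | cons s st ih =>
    intro o
    have hstep : pvStepB pvRank (o.map (fun r => (r, pvP r))) s
        = (pvStep2 o s).map (fun r => (r, pvP r)) := by
      cases hrk : pvRk s with
      | none =>
        have hrk' : pvRank.get? s = none := hrk
        cases o <;> simp [pvStepB, pvStep2, hrk, hrk']
      | some r =>
        have hrk' : pvRank.get? s = some r := hrk
        obtain ⟨hs, -, -⟩ := pvRk_some s r hrk
        cases o with
        | none =>
          simp only [pvStepB, pvStep2, hrk, hrk', Option.map_none, Option.map_some]
          rw [hs]
        | some b =>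
          simp only [pvStepB, pvStep2, hrk, hrk', Option.map_some]
          by_cases hlt : r < b
          · rw [if_pos hlt, min_eq_right (le_of_lt hlt), hs]
          · rw [if_neg hlt, min_eq_left (not_lt.mp hlt)]
    simp only [List.foldl_cons, hstep, ih]

lemma pv_minfold (st : List String) :
    ∀ o : Option Int,
      st.foldl pvStep2 o
        = (st.filterMap pvRk).foldl
            (fun o r => match o with | none => some r | some b => some (min b r)) o := by
  induction st with
  | nil => intro o; rfl
  | cons s st ih =>
    intro o
    cases hrk : pvRk s <;> simp [pvStep2, hrk, ih]

lemma pv_foldl_min_some (l : List Int) :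
    ∀ b : Int,
      l.foldl (fun o r => match o with | none => some r | some b => some (min b r)) (some b)
        = some (l.foldl min b) := by
  induction l with
  | nil => intro b; rfl
  | cons a l ih => intro b; simp [ih]

lemma pv_foldl_min? (l : List Int) :
    l.foldl (fun o r => match o with | none => some r | some b => some (min b r)) none
      = l.min? := by
  cases l with
  | nil => rfl
  | cons a l =>
    rw [List.min?_cons']
    exact pv_foldl_min_some l a

-- the minimal-rank characterisation equals A's first-hit scan over the priority list
lemma pv_find_eq (st : List String) :
    (match pvPriority.find? (fun p => st.contains p) with
     | some p => p
     | none => "—")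
      = (match (st.filterMap pvRk).min? with
         | none => "—"
         | some r => pvP r) := by
  cases hmin : (st.filterMap pvRk).min? with
  | none =>
    have hempty : st.filterMap pvRk = [] := List.min?_eq_none_iff.mp hmin
    have hno : ∀ (p : String) (i : Int), pvRk p = some i → p ∉ st := by
      intro p i hp hmem
      have : i ∈ st.filterMap pvRk := List.mem_filterMap.mpr ⟨p, hmem, hp⟩
      simp [hempty] at this
    rw [List.find?_eq_none.mpr ?_]
    intro p hp
    simp only [pvPriority, List.mem_cons, List.not_mem_nil, or_false] at hp
    simp only [List.contains_iff_mem]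
    rcases hp with rfl | rfl | rfl | rfl | rfl | rfl | rfl | rfl
    · exact hno "DRAFT" 0 (by decide)
    · exact hno "WAITING" 1 (by decide)
    · exact hno "RUNNING" 2 (by decide)
    · exact hno "REVIEW" 3 (by decide)
    · exact hno "DONE" 4 (by decide)
    · exact hno "CONFLICT" 5 (by decide)
    · exact hno "ROLLING_BACK" 6 (by decide)
    · exact hno "REJECTED" 7 (by decide)
  | some r =>
    obtain ⟨hrmem, hrmin⟩ := List.min?_eq_some_iff.mp hmin
    obtain ⟨s, hsmem, hsrk⟩ := List.mem_filterMap.mp hrmem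
    obtain ⟨hsP, hr0, hr8⟩ := pvRk_some s r hsrk
    have hlom : ∀ i : Int, pvRk (pvP i) = some i → i < r → pvP i ∉ st := by
      intro i hri hir hmem
      have := hrmin i (List.mem_filterMap.mpr ⟨pvP i, hmem, hri⟩)
      omega
    have hhitm : pvP r ∈ st := hsP ▸ hsmem
    interval_cases r
    · have hh : ("DRAFT":String) ∈ st := hhitm
      simp [pvPriority, pvP, hh]
    · have h0 : ("DRAFT":String) ∉ st := hlom 0 (by decide) (by norm_num)
      have hh : ("WAITING":String) ∈ st := hhitm
      simp [pvPriority, List.find?, pvP, h0, hh]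
    · have h0 : ("DRAFT":String) ∉ st := hlom 0 (by decide) (by norm_num)
      have h1 : ("WAITING":String) ∉ st := hlom 1 (by decide) (by norm_num)
      have hh : ("RUNNING":String) ∈ st := hhitm
      simp [pvPriority, List.find?, pvP, h0, h1, hh]
    · have h0 : ("DRAFT":String) ∉ st := hlom 0 (by decide) (by norm_num)
      have h1 : ("WAITING":String) ∉ st := hlom 1 (by decide) (by norm_num)
      have h2 : ("RUNNING":String) ∉ st := hlom 2 (by decide) (by norm_num)
      have hh : ("REVIEW":String) ∈ st := hhitm
      simp [pvPriority, List.find?, pvP, h0, h1, h2, hh]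
    · have h0 : ("DRAFT":String) ∉ st := hlom 0 (by decide) (by norm_num)
      have h1 : ("WAITING":String) ∉ st := hlom 1 (by decide) (by norm_num)
      have h2 : ("RUNNING":String) ∉ st := hlom 2 (by decide) (by norm_num)
      have h3 : ("REVIEW":String) ∉ st := hlom 3 (by decide) (by norm_num)
      have hh : ("DONE":String) ∈ st := hhitm
      simp [pvPriority, List.find?, pvP, h0, h1, h2, h3, hh]
    · have h0 : ("DRAFT":String) ∉ st := hlom 0 (by decide) (by norm_num)
      have h1 : ("WAITING":String) ∉ st := hlom 1 (by decide) (by norm_num)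
      have h2 : ("RUNNING":String) ∉ st := hlom 2 (by decide) (by norm_num)
      have h3 : ("REVIEW":String) ∉ st := hlom 3 (by decide) (by norm_num)
      have h4 : ("DONE":String) ∉ st := hlom 4 (by decide) (by norm_num)
      have hh : ("CONFLICT":String) ∈ st := hhitm
      simp [pvPriority, List.find?, pvP, h0, h1, h2, h3, h4, hh]
    · have h0 : ("DRAFT":String) ∉ st := hlom 0 (by decide) (by norm_num)
      have h1 : ("WAITING":String) ∉ st := hlom 1 (by decide) (by norm_num)
      have h2 : ("RUNNING":String) ∉ st := hlom 2 (by decide) (by norm_num)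
      have h3 : ("REVIEW":String) ∉ st := hlom 3 (by decide) (by norm_num)
      have h4 : ("DONE":String) ∉ st := hlom 4 (by decide) (by norm_num)
      have h5 : ("CONFLICT":String) ∉ st := hlom 5 (by decide) (by norm_num)
      have hh : ("ROLLING_BACK":String) ∈ st := hhitm
      simp [pvPriority, List.find?, pvP, h0, h1, h2, h3, h4, h5, hh]
    · have h0 : ("DRAFT":String) ∉ st := hlom 0 (by decide) (by norm_num)
      have h1 : ("WAITING":String) ∉ st := hlom 1 (by decide) (by norm_num)
      have h2 : ("RUNNING":String) ∉ st := hlom 2 (by decide) (by norm_num)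
      have h3 : ("REVIEW":String) ∉ st := hlom 3 (by decide) (by norm_num)
      have h4 : ("DONE":String) ∉ st := hlom 4 (by decide) (by norm_num)
      have h5 : ("CONFLICT":String) ∉ st := hlom 5 (by decide) (by norm_num)
      have h6 : ("ROLLING_BACK":String) ∉ st := hlom 6 (by decide) (by norm_num)
      have hh : ("REJECTED":String) ∈ st := hhitm
      simp [pvPriority, List.find?, pvP, h0, h1, h2, h3, h4, h5, h6, hh]

-- the two ports agree on every list of statuses
lemma pv_core (st : List String) :
    (match pvPriority.find? (fun p => st.contains p) with
     | some p => p
     | none => "—")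
      = (match st.foldl (pvStepB pvRank) none with
         | none => "—"
         | some b => b.2) := by
  have hd := pv_decode st none
  simp only [Option.map_none] at hd
  rw [hd, pv_minfold, pv_foldl_min?, pv_find_eq]
  cases (st.filterMap pvRk).min? <;> rfl

-- pv_core, with B's fused loop over the four doc labels instead of the statuses list
lemma pv_core2 (docs : List (String × String)) :
    (match pvPriority.find? (fun p =>
        ((PySem.List.slice pvDOCS none (some 4)).map
          (fun lp => (PySem.Dict.mk docs).getD lp.1 "—")).contains p) with
     | some p => p
     | none => "—")
      = (match (PySem.List.slice pvDOCS none (some 4)).foldl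
            (fun best lp => pvStepB pvRank best ((PySem.Dict.mk docs).getD lp.1 "—")) none with
         | none => "—"
         | some b => b.2) := by
  have h := pv_core ((PySem.List.slice pvDOCS none (some 4)).map
      (fun lp => (PySem.Dict.mk docs).getD lp.1 "—"))
  rw [List.foldl_map] at h
  exact h

-- ===== VERDICT (by name: the statement is the Claim_ definition above) =====
theorem get_chain_status_spec : Claim_equal_get_chain_status := by
  intro info _ _
  unfold Spec_get_chain_status get_chain_status get_chain_status_alt
  rw [pvRank_built]
  exact pv_core2 _
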